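-- pv_equiv track=rewrite | github.com/sunnyyeti/Leetcode-solutions | June_30Day_Challenges/Validate IP Address.py | isIPV6
-- ===== SOURCE A (Python) =====
-- def isIPV6(string)->bool:
--     def valid_term(term):
--         if len(term)==0 or len(term)>4:
--             return False
--         if any(c not in {'0','1','2','3','4','5','6','7','8','9','a','b','c','d','e','f','A','B','C','D','E','F'} for c in term):
--             return False
--         return True
--     terms = string.split(":")
--     if len(terms)!=8:
--         return False
--     return all(valid_term(term) for term in terms)
-- ===== SOURCE B (Python) =====
-- def isIPV6(string)->bool:
--     # single left-to-right pass: count ':' separators and the length of the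
--     # current run of hex digits; no splitting, no per-term re-scan
--     colons = 0
--     run = 0
--     for c in string:
--         if c == ':':
--             if not (1 <= run <= 4):
--                 return False
--             colons += 1
--             run = 0
--         elif c in "0123456789abcdefABCDEF":
--             run += 1
--         else:
--             return False
--     return colons == 7 and 1 <= run <= 4
-- ===== Notes on version B (the rewrite author's own statement) =====
-- stated objective: alternative
-- what changed: B validates in one left-to-right character scan with a colon counter and current-run length (a small automaton), instead of A's split-on-':' followed by a per-term length/charset loop; no intermediate list of terms is built.
import Mathlib
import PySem

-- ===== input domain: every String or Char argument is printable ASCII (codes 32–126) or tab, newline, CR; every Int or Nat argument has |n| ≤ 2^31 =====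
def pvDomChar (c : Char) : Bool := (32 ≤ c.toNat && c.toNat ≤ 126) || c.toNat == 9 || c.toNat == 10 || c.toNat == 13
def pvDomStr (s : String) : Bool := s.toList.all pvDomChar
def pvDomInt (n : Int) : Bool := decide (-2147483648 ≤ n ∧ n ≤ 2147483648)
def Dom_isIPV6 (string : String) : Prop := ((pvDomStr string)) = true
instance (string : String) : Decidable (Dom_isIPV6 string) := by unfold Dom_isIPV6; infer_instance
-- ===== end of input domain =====

-- B validates with one left-to-right character scan (colon counter + current hex-run length) instead of A's split-on-':' plus per-term checks; same O(n) cost, return values proved equal.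


-- ===== PORT A =====
-- A's hex-digit set literal, in source order
def pvHexA : List Char := ['0','1','2','3','4','5','6','7','8','9','a','b','c','d','e','f','A','B','C','D','E','F']

def validTermA (term : List Char) : Bool :=
  if term.length = 0 || term.length > 4 then false
  else if term.any (fun c => !(pvHexA.contains c)) then false
  else true

def isIPV6 (string : String) : Bool :=
  let terms := PySem.Chars.splitOn string.toList [':']
  if terms.length ≠ 8 then false
  else terms.all validTermA

-- ===== PORT B =====
def pvHexB : List Char := "0123456789abcdefABCDEF".toList

def scanB : List Char → Nat → Nat → Bool
  | [], colons, run => colons == 7 && (1 ≤ run && run ≤ 4)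
  | c :: cs, colons, run =>
    if c = ':' then
      if 1 ≤ run && run ≤ 4 then scanB cs (colons + 1) 0 else false
    else if pvHexB.contains c then scanB cs colons (run + 1)
    else false

def isIPV6_alt (string : String) : Bool := scanB string.toList 0 0

-- ===== PRECONDITION & SPEC =====
def Spec_isIPV6 (string : String) (out : Bool) : Prop := out = isIPV6_alt string
instance (string : String) (out : Bool) : Decidable (Spec_isIPV6 string out) := by unfold Spec_isIPV6; infer_instance

-- ===== CLAIM (what is proved, stated in full; the proofs are below) =====
def Claim_equal_isIPV6 : Prop := ∀ (string : String), Dom_isIPV6 string → Spec_isIPV6 string (isIPV6 string)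

-- ===== LEMMAS AND PROOFS =====

-- functional splitter on ':' used only in the proofs: head segment and the remaining segments
def splitc : List Char → List Char × List (List Char)
  | [] => ([], [])
  | c :: cs =>
    let p := splitc cs
    if c = ':' then ([], p.1 :: p.2) else (c :: p.1, p.2)

theorem splitOn_go_eq (fuel : Nat) : ∀ (cs cur : List Char) (acc : List (List Char)),
    cs.length < fuel →
    PySem.Chars.splitOn.go [':'] fuel cs cur acc
      = acc.reverse ++ (cur.reverse ++ (splitc cs).1) :: (splitc cs).2 := by
  induction fuel with
  | zero => intro cs cur acc h; omega
  | succ f ih =>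
    intro cs cur acc h
    cases cs with
    | nil => simp [PySem.Chars.splitOn.go, splitc]
    | cons c rest =>
      rw [PySem.Chars.splitOn.go]
      by_cases hc : c = ':'
      · subst hc
        have hp : List.isPrefixOf [':'] (':' :: rest) = true := by
          simp [List.isPrefixOf]
        simp only [hp, if_true, List.length_cons, List.length_nil, List.drop_succ_cons, List.drop_zero]
        rw [ih rest [] (cur.reverse :: acc) (by simpa using Nat.lt_of_succ_lt_succ h)]
        simp [splitc]
      · have hp : List.isPrefixOf [':'] (c :: rest) = false := by
          simp [List.isPrefixOf, Ne.symm hc]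
        simp only [hp]
        rw [if_neg (by simp [hc])]
        rw [ih rest (c :: cur) acc (by simpa using Nat.lt_of_succ_lt_succ h)]
        simp [splitc, hc]

theorem splitOn_eq (cs : List Char) :
    PySem.Chars.splitOn cs [':'] = (splitc cs).1 :: (splitc cs).2 := by
  unfold PySem.Chars.splitOn
  rw [splitOn_go_eq (cs.length + 1) cs [] [] (Nat.lt_succ_self _)]
  simp

def hexOK (c : Char) : Bool := pvHexA.contains c

theorem hexB_eq : pvHexB = pvHexA := by
  show String.toList "0123456789abcdefABCDEF" = _
  rw [show "0123456789abcdefABCDEF" = String.ofList ['0','1','2','3','4','5','6','7','8','9','a','b','c','d','e','f','A','B','C','D','E','F'] from rfl]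
  decide

def okTerm (t : List Char) : Bool := (1 ≤ t.length && t.length ≤ 4) && t.all hexOK

theorem validTermA_eq (t : List Char) : validTermA t = okTerm t := by
  unfold validTermA okTerm hexOK
  by_cases h1 : t.length = 0
  · simp [h1]
  · by_cases h2 : t.length > 4
    · have h2' : ¬ t.length ≤ 4 := by omega
      simp [h1, h2, h2']
    · have e1 : 1 ≤ t.length := by omega
      have e2 : t.length ≤ 4 := by omega
      simp only [h1, h2, e1, e2, decide_true, Bool.true_and, if_false, or_self, decide_eq_true_eq]
      rw [if_neg (by simp)]
      cases ha : t.any (fun c => !(pvHexA.contains c))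
      · rw [if_neg (by simp [ha])]
        symm
        rw [List.all_eq_true]
        intro c hc
        have h := (List.any_eq_false.mp ha) c hc
        simpa using h
      · rw [if_pos (by simp [ha])]
        symm
        obtain ⟨c, hc, hx⟩ := List.any_eq_true.mp ha
        exact List.all_eq_false.mpr ⟨c, hc, by simpa using hx⟩

theorem scan_eq (cs : List Char) : ∀ (colons run : Nat),
    scanB cs colons run =
      ((colons + (splitc cs).2.length == 7)
        && ((1 ≤ run + (splitc cs).1.length && run + (splitc cs).1.length ≤ 4))
        && (splitc cs).1.all hexOK
        && (splitc cs).2.all okTerm) := by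
  induction cs with
  | nil => intro colons run; simp [scanB, splitc]
  | cons c rest ih =>
    intro colons run
    by_cases hc : c = ':'
    · subst hc
      simp only [scanB, if_pos rfl]
      by_cases hv : (1 ≤ run && run ≤ 4) = true
      · rw [if_pos hv, ih (colons + 1) 0]
        have hcol : colons + 1 + (splitc rest).2.length = colons + ((splitc rest).2.length + 1) := by
          omega
        simp only [if_true, splitc, List.length_cons, List.length_nil, List.all_cons, List.all_nil, okTerm,
          Nat.zero_add, Nat.add_zero, hcol, hv, Bool.and_true, Bool.true_and, Bool.and_assoc]
      · rw [if_neg hv]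
        have hv' : (1 ≤ run && run ≤ 4) = false := by simpa using hv
        simp only [if_true, splitc, List.length_cons, List.length_nil, List.all_cons, List.all_nil, okTerm,
          Nat.add_zero, hv', Bool.false_and, Bool.and_false, Bool.true_and]
    · simp only [scanB, if_neg hc, splitc, hexB_eq]
      by_cases hx : pvHexA.contains c = true
      · rw [if_pos hx, ih colons (run + 1)]
        simp only [List.all_cons, hexOK, hx, Bool.true_and, List.length_cons]
        have hrr : run + 1 + (splitc rest).1.length = run + ((splitc rest).1.length + 1) := by omega
        rw [hrr]
        rfl
      · rw [if_neg hx]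
        have hx' : hexOK c = false := by simpa [hexOK] using hx
        simp [hx']

-- ===== VERDICT (by name: the statement is the Claim_ definition above) =====
theorem isIPV6_spec : Claim_equal_isIPV6 := by
  intro s _
  unfold Spec_isIPV6 isIPV6 isIPV6_alt
  rw [splitOn_eq, scan_eq]
  rw [show validTermA = okTerm from funext validTermA_eq]
  simp only [List.length_cons, List.all_cons]
  by_cases h : (splitc s.toList).2.length + 1 = 8
  · rw [if_neg (by omega)]
    have h7 : (0 + (splitc s.toList).2.length == 7) = true := by simp only [Nat.zero_add, beq_iff_eq]; omega
    rw [h7]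
    cases h1 : (1 ≤ (splitc s.toList).1.length && (splitc s.toList).1.length ≤ 4) <;>
      cases h2 : (splitc s.toList).1.all hexOK <;>
      cases h3 : (splitc s.toList).2.all okTerm <;>
      simp_all [okTerm]
  · rw [if_pos (by omega)]
    have h7 : (0 + (splitc s.toList).2.length == 7) = false := by simp only [Nat.zero_add, beq_eq_false_iff_ne, ne_eq]; omega
    rw [h7]
    simp
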